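-- pv_equiv track=rewrite | github.com/anyakors/porebump | raw_analysis/bokeh_threshold/threshold_utils.py | drop_occurence
-- ===== SOURCE A (Python) =====
-- def drop_occurence(signals, freq_threshold):
--     k = 0 #last change
--     last = 0 #last value
--     drops = [0]*len(signals)
--     for i in range(0,len(signals)):
--         if signals[i]==last:
--             current = i-k #length of constant value
--             if current>freq_threshold:
--                 drops[i-current:i] = [1]*current
--         else:
--             current = 0
--             last = signals[i]
--             k = i
--     return drops
-- ===== SOURCE B (Python) =====
-- def drop_occurence(signals, freq_threshold):
--     # One pass over maximal runs of equal values; each qualifying run is written once.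
--     out = []
--     i, n = 0, len(signals)
--     while i < n:
--         j = i + 1
--         while j < n and signals[j] == signals[i]:
--             j += 1
--         r = j - i - 1  # run length minus one (A's final 'current' for this run)
--         if r > freq_threshold:
--             out.extend([1] * r)
--             out.append(0)
--         else:
--             out.extend([0] * (r + 1))
--         i = j
--     return out
-- ===== Notes on version B (the rewrite author's own statement) =====
-- stated objective: faster
-- what changed: B makes one pass over maximal runs of equal values and emits each run's marking once, instead of A's rewriting a growing slice of the drops array at every index inside a run; A's virtual initial value 0 is provably invisible, so B needs no special case for it.
import Mathlib
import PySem

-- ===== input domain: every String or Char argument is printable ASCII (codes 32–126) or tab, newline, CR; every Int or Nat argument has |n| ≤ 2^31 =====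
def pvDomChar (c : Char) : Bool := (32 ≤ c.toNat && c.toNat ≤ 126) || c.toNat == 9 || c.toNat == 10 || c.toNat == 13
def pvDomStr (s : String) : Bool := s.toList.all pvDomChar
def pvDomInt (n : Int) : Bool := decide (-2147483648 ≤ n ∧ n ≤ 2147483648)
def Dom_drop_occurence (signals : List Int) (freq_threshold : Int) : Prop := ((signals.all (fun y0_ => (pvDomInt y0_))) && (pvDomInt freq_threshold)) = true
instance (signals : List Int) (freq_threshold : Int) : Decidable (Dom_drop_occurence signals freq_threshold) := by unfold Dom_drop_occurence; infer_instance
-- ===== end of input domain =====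

-- B replaces A's per-index slice rewrites by one pass over maximal runs of equal
-- values, emitting each run's marking once.

-- ===== PORT A =====
-- A's loop body: state (k = last change index, last = last value, drops).
-- The slice assignment drops[i-current:i] = [1]*current is always in range here
-- (0 ≤ i-current ≤ i ≤ len(drops)), so it is exactly take/replicate/drop.
def stepA (signals : List Int) (freq_threshold : Int) :
    Nat × Int × List Int → Nat → Nat × Int × List Int
  | (k, last, drops), i =>
    if signals.getD i 0 = last then
      let current := i - k
      if ((current : Nat) : Int) > freq_threshold then
        (k, last, drops.take (i - current) ++ List.replicate current (1 : Int) ++ drops.drop i)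
      else
        (k, last, drops)
    else
      (i, signals.getD i 0, drops)

def drop_occurence (signals : List Int) (freq_threshold : Int) : List Int :=
  ((List.range signals.length).foldl (stepA signals freq_threshold)
      (0, 0, List.replicate signals.length (0 : Int))).2.2

-- ===== PORT B =====
-- length of the maximal prefix of xs equal to v (B's inner while loop)
def runLen (v : Int) : List Int → Nat
  | [] => 0
  | x :: xs => if x = v then runLen v xs + 1 else 0

theorem runLen_le (v : Int) : ∀ xs : List Int, runLen v xs ≤ xs.length := by
  intro xs
  induction xs with
  | nil => simp [runLen]
  | cons x xs ih =>
    simp only [runLen, List.length_cons]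
    split
    · omega
    · omega

-- B's outer while loop: consume one maximal run, emit its marking, recurse.
def goB (freq_threshold : Int) : List Int → List Int
  | [] => []
  | x :: xs =>
    let r := runLen x xs
    (if ((r : Nat) : Int) > freq_threshold then List.replicate r (1 : Int) ++ [0]
     else List.replicate (r + 1) (0 : Int)) ++ goB freq_threshold (xs.drop r)
termination_by l => l.length
decreasing_by
  have := runLen_le x xs
  simp only [List.length_drop, List.length_cons]
  omega

def drop_occurence_alt (signals : List Int) (freq_threshold : Int) : List Int :=
  goB freq_threshold signals

-- ===== PRECONDITION & SPEC =====
def Spec_drop_occurence (signals : List Int) (freq_threshold : Int) (out : List Int) : Prop := out = drop_occurence_alt signals freq_threshold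
instance (signals : List Int) (freq_threshold : Int) (out : List Int) : Decidable (Spec_drop_occurence signals freq_threshold out) := by unfold Spec_drop_occurence; infer_instance

-- ===== CLAIM (what is proved, stated in full; the proofs are below) =====
def Claim_equal_drop_occurence : Prop := ∀ (signals : List Int) (freq_threshold : Int), Dom_drop_occurence signals freq_threshold → Spec_drop_occurence signals freq_threshold (drop_occurence signals freq_threshold)

-- ===== LEMMAS AND PROOFS =====

theorem goB_nil (thr : Int) : goB thr [] = [] := by
  rw [goB]

theorem goB_cons (thr x : Int) (xs : List Int) :
    goB thr (x :: xs) =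
      (if ((runLen x xs : Nat) : Int) > thr then List.replicate (runLen x xs) (1 : Int) ++ [0]
       else List.replicate (runLen x xs + 1) (0 : Int)) ++ goB thr (xs.drop (runLen x xs)) := by
  rw [goB]

theorem runLen_getD (v : Int) : ∀ (xs : List Int) (t : Nat), t < runLen v xs → xs.getD t 0 = v := by
  intro xs
  induction xs with
  | nil => simp [runLen]
  | cons x xs ih =>
    intro t ht
    simp only [runLen] at ht
    by_cases hx : x = v
    · rw [if_pos hx] at ht
      cases t with
      | zero => simpa
      | succ t => simpa using ih t (by omega)
    · rw [if_neg hx] at ht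
      omega

theorem runLen_stop (v : Int) : ∀ xs : List Int, runLen v xs < xs.length →
    xs.getD (runLen v xs) 0 ≠ v := by
  intro xs
  induction xs with
  | nil => simp [runLen]
  | cons x xs ih =>
    intro h
    by_cases hx : x = v
    · have h' : runLen v xs < xs.length := by
        simp only [runLen, if_pos hx, List.length_cons] at h
        omega
      simpa [runLen, hx] using ih h'
    · simp [runLen, hx]

theorem getD_drop (l : List Int) (i j : Nat) : (l.drop i).getD j 0 = l.getD (i + j) 0 := by
  simp [List.getD_eq_getElem?_getD, List.getElem?_drop]

theorem takeAppendLen {α : Type} (l₁ l₂ : List α) : (l₁ ++ l₂).take l₁.length = l₁ := by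
  induction l₁ with
  | nil => simp
  | cons a l ih => simp [ih]

theorem dropAppendAdd {α : Type} (l₁ l₂ : List α) (k : Nat) :
    (l₁ ++ l₂).drop (l₁.length + k) = l₂.drop k := by
  induction l₁ with
  | nil => simp
  | cons a l ih =>
    rw [List.cons_append, List.length_cons,
      show l.length + 1 + k = (l.length + k) + 1 from by omega, List.drop_succ_cons, ih]

theorem dropReplicate {α : Type} (n m : Nat) (a : α) :
    (List.replicate n a).drop m = List.replicate (n - m) a := by
  induction n generalizing m with
  | zero => simp
  | succ n ih =>
    cases m with
    | zero => simp
    | succ m => simp [List.replicate_succ, ih]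

theorem dropDropAdd {α : Type} (l : List α) (a b : Nat) : (l.drop a).drop b = l.drop (a + b) := by
  induction a generalizing l with
  | zero => simp
  | succ a ih =>
    cases l with
    | nil => simp
    | cons x xs =>
      rw [show a + 1 + b = (a + b) + 1 from by omega, List.drop_succ_cons, List.drop_succ_cons,
        ih xs]

theorem dropConsGetD (l : List Int) (p : Nat) (h : p < l.length) :
    l.drop p = l.getD p 0 :: l.drop (p + 1) := by
  induction l generalizing p with
  | nil => simp at h
  | cons a l ih =>
    cases p with
    | zero => simp
    | succ p =>
      have h' : p < l.length := by simpa using h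
      simpa using ih p h'

-- the within-run fold: processing indices p+1 … p+j, all equal to v, from state (p, v, ·)
theorem inner (signals : List Int) (thr : Int) (p : Nat) (v : Int) :
    ∀ (j : Nat) (pre : List Int), pre.length = p → p + j < signals.length →
    (∀ t, t < j → signals.getD (p + 1 + t) 0 = v) →
    List.foldl (stepA signals thr)
      (p, v, pre ++ List.replicate (signals.length - p) (0 : Int)) (List.range' (p + 1) j)
    = (p, v, (pre ++ (if ((j : Nat) : Int) > thr then List.replicate j (1 : Int)
                      else List.replicate j (0 : Int)))
        ++ List.replicate (signals.length - p - j) (0 : Int)) := by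
  intro j
  induction j with
  | zero => intro pre hpre hlt heq; simp
  | succ j ih =>
    intro pre hpre hlt heq
    rw [List.range'_concat, one_mul, List.foldl_append,
      ih pre hpre (by omega) (fun t ht => heq t (by omega))]
    simp only [List.foldl_cons, List.foldl_nil, stepA]
    rw [heq j (by omega), if_pos rfl,
      show p + 1 + j - p = j + 1 from by omega,
      show ((j + 1 : Nat) : Int) = (j : Int) + 1 from by push_cast; ring,
      show p + 1 + j - (j + 1) = p from by omega]
    by_cases hgt : (j : Int) + 1 > thr
    · rw [if_pos hgt, if_pos hgt]
      have hmidlen : (if ((j : Nat) : Int) > thr then List.replicate j (1 : Int)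
          else List.replicate j (0 : Int)).length = j := by
        split
        · simp
        · simp
      have htake : ((pre ++ (if ((j : Nat) : Int) > thr then List.replicate j (1 : Int)
            else List.replicate j (0 : Int)))
            ++ List.replicate (signals.length - p - j) (0 : Int)).take p = pre := by
        rw [List.append_assoc, ← hpre, takeAppendLen]
      have hdrop : ((pre ++ (if ((j : Nat) : Int) > thr then List.replicate j (1 : Int)
            else List.replicate j (0 : Int)))
            ++ List.replicate (signals.length - p - j) (0 : Int)).drop (p + 1 + j)
            = List.replicate (signals.length - p - (j + 1)) (0 : Int) := by
        have hl : (pre ++ (if ((j : Nat) : Int) > thr then List.replicate j (1 : Int)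
            else List.replicate j (0 : Int))).length = p + j := by
          rw [List.length_append, hpre, hmidlen]
        rw [show p + 1 + j = (p + j) + 1 from by omega, ← hl, dropAppendAdd, dropReplicate,
          show signals.length - p - j - 1 = signals.length - p - (j + 1) from by omega]
      rw [htake, hdrop]
    · rw [if_neg hgt, if_neg hgt]
      have hj : ¬ (((j : Nat) : Int) > thr) := by omega
      rw [if_neg hj]
      have hlist : (pre ++ List.replicate j (0 : Int))
            ++ List.replicate (signals.length - p - j) (0 : Int)
          = (pre ++ List.replicate (j + 1) (0 : Int))
            ++ List.replicate (signals.length - p - (j + 1)) (0 : Int) := by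
        rw [List.append_assoc, List.append_assoc, ← List.replicate_add, ← List.replicate_add,
          show j + (signals.length - p - j) = (j + 1) + (signals.length - p - (j + 1)) from
            by omega]
      rw [hlist]

-- the whole fold from a run boundary at p equals pre ++ B's output on the suffix
theorem outer (signals : List Int) (thr : Int) :
    ∀ (m p k0 : Nat) (lastv : Int) (pre : List Int),
    m = signals.length - p → pre.length = p → p ≤ signals.length →
    (p < signals.length → signals.getD p 0 = lastv → k0 = p) →
    (List.foldl (stepA signals thr)
      (k0, lastv, pre ++ List.replicate (signals.length - p) (0 : Int))
      (List.range' p (signals.length - p))).2.2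
    = pre ++ goB thr (signals.drop p) := by
  intro m
  induction m using Nat.strong_induction_on with
  | _ m ih =>
    intro p k0 lastv pre hm hpre hple hk
    rcases Nat.eq_zero_or_pos m with hm0 | hmpos
    · have hpn : signals.length ≤ p := by omega
      have h0 : signals.length - p = 0 := by omega
      rw [h0, List.drop_eq_nil_of_le hpn, goB_nil]
      simp
    · have hplt : p < signals.length := by omega
      have hdrop_cons : signals.drop p = signals.getD p 0 :: signals.drop (p + 1) :=
        dropConsGetD signals p hplt
      have hs'len : (signals.drop (p + 1)).length = signals.length - (p + 1) := by simp
      obtain ⟨r, hr⟩ : ∃ r, runLen (signals.getD p 0) (signals.drop (p + 1)) = r := ⟨_, rfl⟩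
      have hrle : r ≤ signals.length - (p + 1) := by
        have := runLen_le (signals.getD p 0) (signals.drop (p + 1))
        omega
      have hprn : p + r < signals.length := by omega
      have hsplit : List.range' p (signals.length - p)
          = p :: (List.range' (p + 1) r
              ++ List.range' (p + 1 + 1 * r) (signals.length - (p + 1) - r)) := by
        rw [List.range'_append,
          show r + (signals.length - (p + 1) - r) = signals.length - (p + 1) from by omega,
          show signals.length - p = (signals.length - (p + 1)) + 1 from by omega,
          List.range'_succ]
      rw [hsplit]
      simp only [List.foldl_cons]
      have hstep : stepA signals thr
            (k0, lastv, pre ++ List.replicate (signals.length - p) (0 : Int)) p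
          = (p, signals.getD p 0, pre ++ List.replicate (signals.length - p) (0 : Int)) := by
        simp only [stepA]
        by_cases hvl : signals.getD p 0 = lastv
        · rw [hvl, if_pos rfl, hk hplt hvl, Nat.sub_self]
          split
          · rw [Nat.sub_zero, List.replicate_zero, List.append_nil, List.take_append_drop]
          · rfl
        · rw [if_neg hvl]
      rw [hstep, List.foldl_append, one_mul]
      have heq : ∀ t, t < r → signals.getD (p + 1 + t) 0 = signals.getD p 0 := by
        intro t ht
        have h1 := runLen_getD (signals.getD p 0) (signals.drop (p + 1)) t (by rw [hr]; exact ht)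
        rwa [getD_drop] at h1
      rw [inner signals thr p (signals.getD p 0) r pre hpre (by omega) heq]
      have hseg : (pre ++ (if ((r : Nat) : Int) > thr then List.replicate r (1 : Int)
              else List.replicate r (0 : Int)))
            ++ List.replicate (signals.length - p - r) (0 : Int)
          = (pre ++ (if ((r : Nat) : Int) > thr then List.replicate r (1 : Int) ++ [0]
              else List.replicate (r + 1) (0 : Int)))
            ++ List.replicate (signals.length - (p + 1 + r)) (0 : Int) := by
        rw [List.append_assoc, List.append_assoc]
        congr 1
        rw [show signals.length - p - r = (signals.length - (p + 1 + r)) + 1 from by omega,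
          List.replicate_succ]
        by_cases hgt : ((r : Nat) : Int) > thr
        · rw [if_pos hgt, if_pos hgt]
          simp
        · rw [if_neg hgt, if_neg hgt, List.replicate_succ']
          simp
      rw [hseg]
      have hseglen : (pre ++ (if ((r : Nat) : Int) > thr then List.replicate r (1 : Int) ++ [0]
            else List.replicate (r + 1) (0 : Int))).length = p + 1 + r := by
        rw [List.length_append, hpre]
        split
        · simp
          omega
        · simp
          omega
      have knext : p + 1 + r < signals.length →
          signals.getD (p + 1 + r) 0 = signals.getD p 0 → p = p + 1 + r := by
        intro h1 h2
        exfalso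
        have hstop := runLen_stop (signals.getD p 0) (signals.drop (p + 1)) (by rw [hr]; omega)
        rw [getD_drop, hr] at hstop
        exact hstop h2
      have hrec := ih (m - (r + 1)) (by omega) (p + 1 + r) p (signals.getD p 0)
        (pre ++ (if ((r : Nat) : Int) > thr then List.replicate r (1 : Int) ++ [0]
          else List.replicate (r + 1) (0 : Int)))
        (by omega) hseglen (by omega) knext
      rw [show signals.length - (p + 1) - r = signals.length - (p + 1 + r) from by omega]
      rw [hrec]
      rw [hdrop_cons, goB_cons, hr]
      rw [dropDropAdd, show p + 1 + r = p + 1 + r from rfl]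
      rw [List.append_assoc]

-- ===== VERDICT (by name: the statement is the Claim_ definition above) =====
theorem drop_occurence_spec : Claim_equal_drop_occurence := by
  intro signals thr _
  unfold Spec_drop_occurence drop_occurence drop_occurence_alt
  rw [List.range_eq_range']
  have h := outer signals thr signals.length 0 0 0 []
    (by omega) rfl (by omega) (fun _ _ => rfl)
  simpa using h
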